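-- pv_equiv track=rewrite | github.com/khaitrinh2010/Shell-simulation | variable_substitute.py | neededToSubStitute
-- ===== SOURCE A (Python) =====
-- def neededToSubStitute(command):
--     pot = False
--     if isinstance(command, list):
--         for each in command:
--             if "$" in each:
--                 return True
--         return False
--     else:
--         for i in range(len(command)):
--             char = command[i]
--             if char == "$" and i < len(command) - 1 and command[i + 1] == "{":
--                 pot = True
--             if char == "}" and pot:
--                 return True
--     return False
-- ===== SOURCE B (Python) =====
-- def neededToSubStitute(command):
--     if isinstance(command, list):
--         return any("$" in each for each in command)
--     n = len(command)
--     opens = [i for i in range(n - 1) if command[i] == "$" and command[i + 1] == "{"]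
--     closes = [i for i in range(n) if command[i] == "}"]
--     return bool(opens) and bool(closes) and opens[0] + 1 < closes[-1]
-- ===== Notes on version B (the rewrite author's own statement) =====
-- stated objective: alternative
-- what changed: replaces A's single stateful early-return scan (sticky pot flag) by two staged index-collection passes -- the list of all '${' positions and the list of all '}' positions -- followed by one arithmetic comparison of the first open position against the last close position (list branch becomes an any-generator)
import Mathlib
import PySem

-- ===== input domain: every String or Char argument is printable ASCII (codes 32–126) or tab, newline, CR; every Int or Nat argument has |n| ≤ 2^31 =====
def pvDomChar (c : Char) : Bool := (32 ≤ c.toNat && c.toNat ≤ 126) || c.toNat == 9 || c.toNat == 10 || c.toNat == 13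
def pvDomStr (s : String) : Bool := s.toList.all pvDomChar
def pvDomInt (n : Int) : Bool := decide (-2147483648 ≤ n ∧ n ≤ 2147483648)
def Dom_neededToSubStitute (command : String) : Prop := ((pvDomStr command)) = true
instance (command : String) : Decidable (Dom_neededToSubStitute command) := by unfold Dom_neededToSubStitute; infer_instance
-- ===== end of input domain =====

-- B replaces A's single stateful early-return scan by two staged index-collection passes
-- ('${' positions and '}' positions) plus one comparison of the first open against the last
-- close (alternative decomposition, same O(n) cost).
-- The Lean signature is String, so only the string (else) branch of each Python is ported.

-- ===== PORT A =====
-- the for-i loop over command: 'pot' is the sticky flag; Python's 'i < len-1 and command[i+1] == "{"' is the head? lookahead on the rest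
def pvAGo : List Char → Bool → Bool
  | [], _ => false
  | c :: rest, pot =>
    let pot' := if c == '$' && rest.head? == some '{' then true else pot
    if c == '}' && pot' then true else pvAGo rest pot'

def neededToSubStitute (command : String) : Bool :=
  pvAGo command.toList false

-- ===== PORT B =====
-- Source B's two comprehensions over range(n-1)/range(n) and the final bool/index comparison
def neededToSubStitute_alt (command : String) : Bool :=
  let cs := command.toList
  let n := cs.length
  let opens := (List.range (n - 1)).filter (fun i => cs[i]? == some '$' && cs[i+1]? == some '{')
  let closes := (List.range n).filter (fun i => cs[i]? == some '}')
  !opens.isEmpty && !closes.isEmpty && decide (opens.headD 0 + 1 < closes.getLastD 0)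

-- ===== PRECONDITION & SPEC =====
def Spec_neededToSubStitute (command : String) (out : Bool) : Prop := out = neededToSubStitute_alt command
instance (command : String) (out : Bool) : Decidable (Spec_neededToSubStitute command out) := by unfold Spec_neededToSubStitute; infer_instance

-- ===== CLAIM (what is proved, stated in full; the proofs are below) =====
def Claim_equal_neededToSubStitute : Prop := ∀ (command : String), Dom_neededToSubStitute command → Spec_neededToSubStitute command (neededToSubStitute command)

-- ===== LEMMAS AND PROOFS =====

-- A once the pot flag is set: true iff a '}' remains
theorem pvAGo_true_eq (cs : List Char) : pvAGo cs true = cs.contains '}' := by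
  induction cs with
  | nil => rfl
  | cons c rest ih =>
    simp only [pvAGo, List.contains_cons]
    by_cases hc : c = '}'
    · simp [hc]
    · have : (c == '}') = false := by simpa using hc
      simp [this, ih]
      intro h; exact absurd h.symm hc

theorem pvAGo_mono (u v : List Char) (pot : Bool)
    (h : '}' ∈ v) : pvAGo (u ++ '$' :: '{' :: v) pot = true := by
  induction u generalizing pot with
  | nil =>
    simp only [List.nil_append, pvAGo, List.head?_cons]
    have h1 : (('$' : Char) == '$') = true := by decide
    have h2 : (('$' : Char) == '}') = false := by decide
    have h3 : (('{' : Char) == '}') = false := by decide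
    simp only [h1, h2, h3, beq_self_eq_true, Bool.and_true, Bool.and_self,
      if_pos, Bool.false_eq_true, if_false, ite_self]
    rw [pvAGo_true_eq]
    simp [h]
  | cons c u' ih =>
    simp only [List.cons_append, pvAGo]
    split <;> split
    · rfl
    · exact ih _
    · rfl
    · exact ih _

theorem pvAGo_false_char (cs : List Char) (h : pvAGo cs false = true) :
    ∃ u v, cs = u ++ '$' :: '{' :: v ∧ '}' ∈ v := by
  induction cs with
  | nil => simp [pvAGo] at h
  | cons c rest ih =>
    simp only [pvAGo] at h
    by_cases hp : (c == '$' && rest.head? == some '{') = true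
    · obtain ⟨hc, hh⟩ := Bool.and_eq_true_iff.mp hp
      have hc' : c = '$' := by simpa using hc
      obtain ⟨v, hv⟩ : ∃ v, rest = '{' :: v := by
        cases rest with
        | nil => simp at hh
        | cons r rs =>
          refine ⟨rs, ?_⟩
          have : r = '{' := by simpa using hh
          simp [this]
      subst hc' hv
      simp only [hp, if_pos] at h
      have hne : (('$' : Char) == '}' && true) = false := by decide
      rw [hne] at h
      simp only [Bool.false_eq_true, if_false] at h
      rw [pvAGo_true_eq] at h
      have : '}' ∈ '{' :: v := by simpa using h
      have hv' : '}' ∈ v := by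
        rcases List.mem_cons.mp this with h' | h'
        · exact absurd h' (by decide)
        · exact h'
      exact ⟨[], v, rfl, hv'⟩
    · rw [Bool.not_eq_true] at hp
      simp only [hp, Bool.false_eq_true, if_false, Bool.and_false] at h
      obtain ⟨u, v, huv, hv⟩ := ih h
      exact ⟨c :: u, v, by simp [huv], hv⟩

theorem pvA_char (cs : List Char) :
    pvAGo cs false = true ↔ ∃ u v, cs = u ++ '$' :: '{' :: v ∧ '}' ∈ v :=
  ⟨pvAGo_false_char cs, fun ⟨u, v, huv, hv⟩ => huv ▸ pvAGo_mono u v false hv⟩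

-- the decomposition form restated in index form
theorem pvIdx_char (cs : List Char) :
    (∃ u v, cs = u ++ '$' :: '{' :: v ∧ '}' ∈ v) ↔
    (∃ i k, cs[i]? = some '$' ∧ cs[i+1]? = some '{' ∧ i + 2 ≤ k ∧ cs[k]? = some '}') := by
  constructor
  · rintro ⟨u, v, rfl, hv⟩
    obtain ⟨j, hj, hjv⟩ := List.getElem_of_mem hv
    refine ⟨u.length, u.length + 2 + j, ?_, ?_, by omega, ?_⟩
    · rw [List.getElem?_append_right (le_refl _)]; simp
    · rw [List.getElem?_append_right (by omega)]
      simp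
    · rw [List.getElem?_append_right (by omega)]
      have : u.length + 2 + j - u.length = j + 2 := by omega
      rw [this]
      simp [hjv.symm ▸ List.getElem?_eq_getElem hj]
  · rintro ⟨i, k, hi, hi1, hik, hk⟩
    have hilt : i < cs.length := (List.getElem?_eq_some_iff.mp hi).1
    have hi1lt : i + 1 < cs.length := (List.getElem?_eq_some_iff.mp hi1).1
    have hklt : k < cs.length := (List.getElem?_eq_some_iff.mp hk).1
    refine ⟨cs.take i, cs.drop (i + 2), ?_, ?_⟩
    · have h1 : cs.drop i = cs[i] :: cs.drop (i + 1) := List.drop_eq_getElem_cons hilt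
      have h2 : cs.drop (i + 1) = cs[i+1] :: cs.drop (i + 2) := List.drop_eq_getElem_cons hi1lt
      have hci : cs[i] = '$' := by
        have := List.getElem?_eq_getElem hilt; rw [hi] at this; exact (Option.some.inj this).symm
      have hci1 : cs[i+1] = '{' := by
        have := List.getElem?_eq_getElem hi1lt; rw [hi1] at this; exact (Option.some.inj this).symm
      conv_lhs => rw [← List.take_append_drop i cs]
      rw [h1, h2, hci, hci1]
    · have : (cs.drop (i + 2))[k - (i + 2)]? = cs[k]? := by
        rw [List.getElem?_drop]; congr 1; omega
      exact List.mem_of_getElem? (this ▸ hk)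

-- first element of a strictly increasing list is a lower bound, last an upper bound
theorem pvHeadD_le {l : List Nat} (h : l.Pairwise (· < ·)) {x : Nat} (hx : x ∈ l) :
    l.headD 0 ≤ x := by
  cases l with
  | nil => cases hx
  | cons a t =>
    rcases List.mem_cons.mp hx with rfl | hx
    · simp
    · exact le_of_lt ((List.pairwise_cons.mp h).1 x hx)

theorem pvLe_getLastD {l : List Nat} (h : l.Pairwise (· < ·)) :
    ∀ x ∈ l, x ≤ l.getLastD 0 := by
  induction l with
  | nil => intro x hx; cases hx
  | cons a t ih =>
    intro x hx
    cases t with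
    | nil => simp at hx; simp [hx]
    | cons b u =>
      have h' := (List.pairwise_cons.mp h).2
      have hlast : (a :: b :: u).getLastD 0 = (b :: u).getLastD 0 := by simp [List.getLastD]
      rcases List.mem_cons.mp hx with rfl | hx
      · have hb : x < b := (List.pairwise_cons.mp h).1 b (by simp)
        have hble := ih h' b (by simp)
        rw [hlast]; omega
      · rw [hlast]; exact ih h' x hx

theorem pvHeadD_mem {l : List Nat} (h : l ≠ []) : l.headD 0 ∈ l := by
  cases l with
  | nil => exact absurd rfl h
  | cons a t => simp

theorem pvGetLastD_mem {l : List Nat} (h : l ≠ []) : l.getLastD 0 ∈ l := by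
  induction l with
  | nil => exact absurd rfl h
  | cons a t ih =>
    cases t with
    | nil => simp
    | cons b u =>
      have : (a :: b :: u).getLastD 0 = (b :: u).getLastD 0 := by simp [List.getLastD]
      rw [this]
      exact List.mem_cons_of_mem a (ih (by simp))

-- characterisation of B
theorem pvB_char (cs : List Char) :
    (let n := cs.length
     let opens := (List.range (n - 1)).filter (fun i => cs[i]? == some '$' && cs[i+1]? == some '{')
     let closes := (List.range n).filter (fun i => cs[i]? == some '}')
     !opens.isEmpty && !closes.isEmpty && decide (opens.headD 0 + 1 < closes.getLastD 0)) = true ↔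
    (∃ i k, cs[i]? = some '$' ∧ cs[i+1]? = some '{' ∧ i + 2 ≤ k ∧ cs[k]? = some '}') := by
  simp only []
  set n := cs.length with hn
  set opens := (List.range (n - 1)).filter (fun i => cs[i]? == some '$' && cs[i+1]? == some '{') with ho
  set closes := (List.range n).filter (fun i => cs[i]? == some '}') with hc
  have hmemo : ∀ i, i ∈ opens ↔ cs[i]? = some '$' ∧ cs[i+1]? = some '{' := by
    intro i
    rw [ho, List.mem_filter, List.mem_range]
    constructor
    · rintro ⟨-, h⟩
      exact ⟨by simpa using (Bool.and_eq_true_iff.mp h).1, by simpa using (Bool.and_eq_true_iff.mp h).2⟩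
    · rintro ⟨h1, h2⟩
      have : i + 1 < n := (List.getElem?_eq_some_iff.mp h2).1
      exact ⟨by omega, by simp [h1, h2]⟩
  have hmemc : ∀ k, k ∈ closes ↔ cs[k]? = some '}' := by
    intro k
    rw [hc, List.mem_filter, List.mem_range]
    constructor
    · rintro ⟨-, h⟩; simpa using h
    · intro h; exact ⟨(List.getElem?_eq_some_iff.mp h).1, by simp [h]⟩
  have hpo : opens.Pairwise (· < ·) := List.Pairwise.filter _ (List.pairwise_lt_range)
  have hpc : closes.Pairwise (· < ·) := List.Pairwise.filter _ (List.pairwise_lt_range)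
  constructor
  · intro h
    have h1 := (Bool.and_eq_true_iff.mp h)
    obtain ⟨h2, h3⟩ := Bool.and_eq_true_iff.mp h1.1
    have hone : opens ≠ [] := by simpa [List.isEmpty_iff] using h2
    have hcne : closes ≠ [] := by simpa [List.isEmpty_iff] using h3
    have hlt : opens.headD 0 + 1 < closes.getLastD 0 := by simpa using h1.2
    obtain ⟨ha, hb⟩ := (hmemo _).mp (pvHeadD_mem hone)
    have hck := (hmemc _).mp (pvGetLastD_mem hcne)
    exact ⟨opens.headD 0, closes.getLastD 0, ha, hb, by omega, hck⟩
  · rintro ⟨i, k, h1, h2, hik, hk⟩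
    have hio : i ∈ opens := (hmemo i).mpr ⟨h1, h2⟩
    have hkc : k ∈ closes := (hmemc k).mpr hk
    have hone : opens ≠ [] := List.ne_nil_of_mem hio
    have hcne : closes ≠ [] := List.ne_nil_of_mem hkc
    have hle1 : opens.headD 0 ≤ i := pvHeadD_le hpo hio
    have hle2 : k ≤ closes.getLastD 0 := pvLe_getLastD hpc k hkc
    have e1 : opens.isEmpty = false := by simp [hone]
    have e2 : closes.isEmpty = false := by simp [hcne]
    rw [e1, e2]
    simp only [Bool.not_false, Bool.true_and, decide_eq_true_eq]
    omega

theorem neededToSubStitute_equiv (command : String) :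
    neededToSubStitute command = neededToSubStitute_alt command := by
  unfold neededToSubStitute neededToSubStitute_alt
  rw [Bool.eq_iff_iff, pvA_char, pvIdx_char]
  exact (pvB_char command.toList).symm

-- ===== VERDICT (by name: the statement is the Claim_ definition above) =====
theorem neededToSubStitute_spec : Claim_equal_neededToSubStitute := by
  intro command _
  exact neededToSubStitute_equiv command
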